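-- pv_equiv track=rewrite | github.com/Clinical-Genomics/scout | scout/utils/ccv.py | get_ccv_points
-- ===== SOURCE A (Python) =====
-- def get_ccv_points(ccv_terms: set) -> int:
--     """
--     Use the algorithm described in Clingen-CGC-VIGG classification paper (Horak 2022)
--     Given a set of CCV evidence criteria terms
--     for each term,
--       check prefixes if no suffix match or stand-alone criteria match
--
--     O positive, SB negative.
--     VS 8 points, S 4, M 2, P 1.
--
--     If no terms return None
--
--     Args:
--         ccv_terms(set(str)): A collection of prediction terms
--     Returns:
--         points(int):"""
--
--     ovs_terms = []
--     os_terms = []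
--     om_terms = []
--     op_terms = []
--     sbvs_terms = []
--     sbs_terms = []
--     sbm_terms = []
--     sbp_terms = []
--
--     prefix_map = {
--         "OVS": ovs_terms,
--         "OS": os_terms,
--         "OM": om_terms,
--         "OP": op_terms,
--         "SBVS": sbvs_terms,
--         "SBS": sbs_terms,
--         "SBM": sbm_terms,
--         "SBP": sbp_terms,
--     }
--
--     suffix_map = {
--         "_Strong": {"O": os_terms, "SB": sbs_terms},
--         "_Moderate": {"O": om_terms, "SB": sbm_terms},
--         "_Supporting": {"O": op_terms, "SB": sbp_terms},
--     }
--
--     for term in ccv_terms: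
--         for suffix, prefix_dict in suffix_map.items():
--             if term.endswith(suffix):
--                 for prefix, term_list in prefix_dict.items():
--                     if term.startswith(prefix):
--                         term_list.append(term)
--                         break
--                 else:
--                     continue
--                 break
--         else:
--             for prefix, term_list in prefix_map.items():
--                 if term.startswith(prefix):
--                     term_list.append(term)
--                     break
--     points = (
--         8 * len(ovs_terms)
--         + 4 * len(os_terms)
--         + 2 * len(om_terms)
--         + len(op_terms)
--         - 8 * len(sbvs_terms)
--         - 4 * len(sbs_terms)
--         - 2 * len(sbm_terms)
--         - len(sbp_terms)
--     )
--     return points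
-- ===== SOURCE B (Python) =====
-- def get_ccv_points(ccv_terms: set) -> int:
--     # Factor each term's score into sign * magnitude: the sign comes from the
--     # evidence class ("O" = +1, "SB" = -1, anything else scores 0), and the
--     # magnitude comes from the strength suffix (_Strong/_Moderate/_Supporting
--     # -> 4/2/1) or, failing that, from the strength letters that follow the
--     # class prefix (VS/S/M/P -> 8/4/2/1).
--     total = 0
--     for term in ccv_terms:
--         if term.startswith("O"):
--             sign, rest = 1, term[1:]
--         elif term.startswith("SB"):
--             sign, rest = -1, term[2:]
--         else:
--             continue
--         if term.endswith("_Strong"):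
--             mag = 4
--         elif term.endswith("_Moderate"):
--             mag = 2
--         elif term.endswith("_Supporting"):
--             mag = 1
--         elif rest.startswith("VS"):
--             mag = 8
--         elif rest.startswith("S"):
--             mag = 4
--         elif rest.startswith("M"):
--             mag = 2
--         elif rest.startswith("P"):
--             mag = 1
--         else:
--             mag = 0
--         total += sign * mag
--     return total
-- ===== Notes on version B (the rewrite author's own statement) =====
-- stated objective: simpler
-- what changed: Replaces A's eight mutable bucket lists, the table-driven nested for-else loops over a suffix map and a prefix map, and the final length-weighted sum by factoring each term's score into sign (O -> +1, SB -> -1, else skip) times magnitude (strength suffix _Strong/_Moderate/_Supporting -> 4/2/1, else the strength letters VS/S/M/P after the stripped class prefix -> 8/4/2/1), accumulated in one running total.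
import Mathlib
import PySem

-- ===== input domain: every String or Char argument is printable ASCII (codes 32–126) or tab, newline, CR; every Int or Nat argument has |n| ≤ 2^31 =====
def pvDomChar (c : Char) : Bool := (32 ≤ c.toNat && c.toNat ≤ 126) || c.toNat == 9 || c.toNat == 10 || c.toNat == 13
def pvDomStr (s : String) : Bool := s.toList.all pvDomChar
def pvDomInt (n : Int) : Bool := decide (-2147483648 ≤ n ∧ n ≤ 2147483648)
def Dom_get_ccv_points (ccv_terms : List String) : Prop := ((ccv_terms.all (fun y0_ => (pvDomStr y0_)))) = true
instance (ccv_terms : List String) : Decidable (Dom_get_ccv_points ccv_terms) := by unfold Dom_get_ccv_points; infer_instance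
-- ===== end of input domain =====

-- B replaces A's eight bucket lists and table-driven nested loops by factoring each term's
-- score into sign (O/SB class) times magnitude (strength suffix, else the letters after the
-- class prefix), accumulated in one running total (objective: simpler).

-- ===== PORT A =====
-- The eight bucket lists of A; tags: 0=ovs 1=os 2=om 3=op 4=sbvs 5=sbs 6=sbm 7=sbp.
structure CcvSt where
  ovs : List String
  os : List String
  om : List String
  op : List String
  sbvs : List String
  sbs : List String
  sbm : List String
  sbp : List String
deriving Repr

def ccvAppend (st : CcvSt) (tag : Nat) (t : String) : CcvSt :=
  if tag = 0 then { st with ovs := st.ovs ++ [t] }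
  else if tag = 1 then { st with os := st.os ++ [t] }
  else if tag = 2 then { st with om := st.om ++ [t] }
  else if tag = 3 then { st with op := st.op ++ [t] }
  else if tag = 4 then { st with sbvs := st.sbvs ++ [t] }
  else if tag = 5 then { st with sbs := st.sbs ++ [t] }
  else if tag = 6 then { st with sbm := st.sbm ++ [t] }
  else { st with sbp := st.sbp ++ [t] }

-- prefix_map: prefix → bucket tag, in A's insertion order
def ccvPrefixMapA : List (String × Nat) :=
  [("OVS", 0), ("OS", 1), ("OM", 2), ("OP", 3), ("SBVS", 4), ("SBS", 5), ("SBM", 6), ("SBP", 7)]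

-- suffix_map: suffix → (prefix → bucket tag), in A's insertion order
def ccvSuffixMapA : List (String × List (String × Nat)) :=
  [("_Strong", [("O", 1), ("SB", 5)]),
   ("_Moderate", [("O", 2), ("SB", 6)]),
   ("_Supporting", [("O", 3), ("SB", 7)])]

-- inner 'for prefix, term_list in prefix_dict.items(): if startswith: append; break / else: continue'
def ccvInnerA (term : String) : List (String × Nat) → Option Nat
  | [] => none
  | (p, tag) :: rest =>
    if PySem.Str.startswith term p then some tag else ccvInnerA term rest

-- for-else of the outer loop: 'for prefix, term_list in prefix_map.items(): if startswith: append; break'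
def ccvPrefixScanA (st : CcvSt) (term : String) : List (String × Nat) → CcvSt
  | [] => st
  | (p, tag) :: rest =>
    if PySem.Str.startswith term p then ccvAppend st tag term else ccvPrefixScanA st term rest

-- outer 'for suffix, prefix_dict in suffix_map.items(): …' with its for-else falling to prefix_map
def ccvOuterA (st : CcvSt) (term : String) : List (String × List (String × Nat)) → CcvSt
  | [] => ccvPrefixScanA st term ccvPrefixMapA
  | (suf, pd) :: rest =>
    if PySem.Str.endswith term suf then
      match ccvInnerA term pd with
      | some tag => ccvAppend st tag term
      | none => ccvOuterA st term rest   -- inner for-else: continue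
    else ccvOuterA st term rest

def get_ccv_points (ccv_terms : List String) : Int :=
  let fin := ccv_terms.foldl (fun st term => ccvOuterA st term ccvSuffixMapA)
    ⟨[], [], [], [], [], [], [], []⟩
  8 * (fin.ovs.length : Int) + 4 * (fin.os.length : Int) + 2 * (fin.om.length : Int)
    + (fin.op.length : Int) - 8 * (fin.sbvs.length : Int) - 4 * (fin.sbs.length : Int)
    - 2 * (fin.sbm.length : Int) - (fin.sbp.length : Int)

-- ===== PORT B =====
-- Source B's magnitude chain: strength suffix on the whole term, else strength letters of `rest`
def ccvMag (term rest : String) : Int :=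
  if PySem.Str.endswith term "_Strong" then 4
  else if PySem.Str.endswith term "_Moderate" then 2
  else if PySem.Str.endswith term "_Supporting" then 1
  else if PySem.Str.startswith rest "VS" then 8
  else if PySem.Str.startswith rest "S" then 4
  else if PySem.Str.startswith rest "M" then 2
  else if PySem.Str.startswith rest "P" then 1
  else 0

def get_ccv_points_alt (ccv_terms : List String) : Int :=
  ccv_terms.foldl (fun total term =>
    if PySem.Str.startswith term "O" then
      total + 1 * ccvMag term (PySem.Str.slice term (some 1) none)
    else if PySem.Str.startswith term "SB" then
      total + (-1) * ccvMag term (PySem.Str.slice term (some 2) none)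
    else total) 0   -- 'continue'

-- ===== PRECONDITION & SPEC =====
def Spec_get_ccv_points (ccv_terms : List String) (out : Int) : Prop := out = get_ccv_points_alt ccv_terms
instance (ccv_terms : List String) (out : Int) : Decidable (Spec_get_ccv_points ccv_terms out) := by unfold Spec_get_ccv_points; infer_instance

-- ===== CLAIM (what is proved, stated in full; the proofs are below) =====
def Claim_equal_get_ccv_points : Prop := ∀ (ccv_terms : List String), Dom_get_ccv_points ccv_terms → Spec_get_ccv_points ccv_terms (get_ccv_points ccv_terms)

-- ===== LEMMAS AND PROOFS =====
def ccvSum (st : CcvSt) : Int :=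
  8 * (st.ovs.length : Int) + 4 * (st.os.length : Int) + 2 * (st.om.length : Int)
    + (st.op.length : Int) - 8 * (st.sbvs.length : Int) - 4 * (st.sbs.length : Int)
    - 2 * (st.sbm.length : Int) - (st.sbp.length : Int)

-- B's per-term contribution (what one iteration of Source B's loop adds to total)
def ccvAltPts (t : String) : Int :=
  if PySem.Str.startswith t "O" then 1 * ccvMag t (PySem.Str.slice t (some 1) none)
  else if PySem.Str.startswith t "SB" then (-1) * ccvMag t (PySem.Str.slice t (some 2) none)
  else 0

theorem ccv_sw_mono (t p q : String) (hpq : p.toList <+: q.toList)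
    (hp : PySem.Str.startswith t p = false) : PySem.Str.startswith t q = false := by
  refine Bool.eq_false_iff.mpr fun hx => ?_
  have h : q.toList <+: t.toList := (PySem.Chars.startswith_iff _ _).mp
    (by simpa [PySem.Str.startswith_eq] using hx)
  have htrue : PySem.Str.startswith t p = true := by
    rw [PySem.Str.startswith_eq]
    exact (PySem.Chars.startswith_iff _ _).mpr (hpq.trans h)
  rw [htrue] at hp; cases hp

set_option maxHeartbeats 1600000 in
theorem ccv_step (st : CcvSt) (t : String) :
    ccvSum (ccvOuterA st t ccvSuffixMapA) = ccvSum st + ccvAltPts t := by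
  rcases hl : t.toList with _ | ⟨c, rest⟩
  case nil =>
    have hO : PySem.Str.startswith t "O" = false := by
      simp [PySem.Str.startswith_eq, hl, PySem.Chars.startswith, List.isPrefixOf]
    have hSB : PySem.Str.startswith t "SB" = false := by
      simp [PySem.Str.startswith_eq, hl, PySem.Chars.startswith, List.isPrefixOf]
    have h1 := ccv_sw_mono t "O" "OVS" (by decide) hO
    have h2 := ccv_sw_mono t "O" "OS" (by decide) hO
    have h3 := ccv_sw_mono t "O" "OM" (by decide) hO
    have h4 := ccv_sw_mono t "O" "OP" (by decide) hO
    have h5 := ccv_sw_mono t "SB" "SBVS" (by decide) hSB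
    have h6 := ccv_sw_mono t "SB" "SBS" (by decide) hSB
    have h7 := ccv_sw_mono t "SB" "SBM" (by decide) hSB
    have h8 := ccv_sw_mono t "SB" "SBP" (by decide) hSB
    simp only [ccvSuffixMapA, ccvOuterA, ccvInnerA, ccvPrefixScanA, ccvPrefixMapA, ccvAltPts,
      ccvMag, hO, hSB, h1, h2, h3, h4, h5, h6, h7, h8, Bool.false_eq_true, if_false, ite_false]
    split_ifs <;> simp [ccvSum]
  case cons =>
    by_cases hc : c = 'O'
    case pos =>
      subst hc
      have hO : PySem.Str.startswith t "O" = true := by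
        simp [PySem.Str.startswith_eq, hl, PySem.Chars.startswith, List.isPrefixOf]
      have hSB : PySem.Str.startswith t "SB" = false := by
        simp [PySem.Str.startswith_eq, hl, PySem.Chars.startswith, List.isPrefixOf]
      have hOVS : PySem.Str.startswith t "OVS" = PySem.Str.startswith (PySem.Str.slice t (some 1) none) "VS" := by
        simp [PySem.Str.startswith_eq, PySem.Str.toList_slice, PySem.Chars.slice_eq_listSlice,
          PySem.List.slice_from, hl, PySem.Chars.startswith]
      have hOS : PySem.Str.startswith t "OS" = PySem.Str.startswith (PySem.Str.slice t (some 1) none) "S" := by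
        simp [PySem.Str.startswith_eq, PySem.Str.toList_slice, PySem.Chars.slice_eq_listSlice,
          PySem.List.slice_from, hl, PySem.Chars.startswith]
      have hOM : PySem.Str.startswith t "OM" = PySem.Str.startswith (PySem.Str.slice t (some 1) none) "M" := by
        simp [PySem.Str.startswith_eq, PySem.Str.toList_slice, PySem.Chars.slice_eq_listSlice,
          PySem.List.slice_from, hl, PySem.Chars.startswith]
      have hOP : PySem.Str.startswith t "OP" = PySem.Str.startswith (PySem.Str.slice t (some 1) none) "P" := by
        simp [PySem.Str.startswith_eq, PySem.Str.toList_slice, PySem.Chars.slice_eq_listSlice,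
          PySem.List.slice_from, hl, PySem.Chars.startswith]
      have hS1 : PySem.Str.startswith t "SBVS" = false := ccv_sw_mono t "SB" "SBVS" (by decide) hSB
      have hS2 : PySem.Str.startswith t "SBS" = false := ccv_sw_mono t "SB" "SBS" (by decide) hSB
      have hS3 : PySem.Str.startswith t "SBM" = false := ccv_sw_mono t "SB" "SBM" (by decide) hSB
      have hS4 : PySem.Str.startswith t "SBP" = false := ccv_sw_mono t "SB" "SBP" (by decide) hSB
      simp only [ccvSuffixMapA, ccvOuterA, ccvInnerA, ccvPrefixScanA, ccvPrefixMapA, ccvAltPts,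
        ccvMag, hO, hSB, hOVS, hOS, hOM, hOP, hS1, hS2, hS3, hS4, if_true, if_false,
        Bool.false_eq_true, ite_false, ite_true]
      split_ifs <;> simp [ccvSum, ccvAppend] <;> ring
    case neg =>
      by_cases hSB2 : c = 'S' ∧ PySem.Chars.startswith rest ['B'] = true
      case pos =>
        obtain ⟨hS, hB⟩ := hSB2
        subst hS
        obtain ⟨rest2, hr⟩ : ∃ rest2, rest = 'B' :: rest2 := by
          have := (PySem.Chars.startswith_iff _ _).mp hB
          obtain ⟨l, hl2⟩ := this
          exact ⟨l, hl2.symm⟩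
        subst hr
        have hO : PySem.Str.startswith t "O" = false := by
          simp [PySem.Str.startswith_eq, hl, PySem.Chars.startswith, List.isPrefixOf]
        have hSB : PySem.Str.startswith t "SB" = true := by
          simp [PySem.Str.startswith_eq, hl, PySem.Chars.startswith, List.isPrefixOf]
        have hO1 : PySem.Str.startswith t "OVS" = false := ccv_sw_mono t "O" "OVS" (by decide) hO
        have hO2 : PySem.Str.startswith t "OS" = false := ccv_sw_mono t "O" "OS" (by decide) hO
        have hO3 : PySem.Str.startswith t "OM" = false := ccv_sw_mono t "O" "OM" (by decide) hO
        have hO4 : PySem.Str.startswith t "OP" = false := ccv_sw_mono t "O" "OP" (by decide) hO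
        have hSVS : PySem.Str.startswith t "SBVS" = PySem.Str.startswith (PySem.Str.slice t (some 2) none) "VS" := by
          simp [PySem.Str.startswith_eq, PySem.Str.toList_slice, PySem.Chars.slice_eq_listSlice,
            PySem.List.slice_from, hl, PySem.Chars.startswith]
        have hSS : PySem.Str.startswith t "SBS" = PySem.Str.startswith (PySem.Str.slice t (some 2) none) "S" := by
          simp [PySem.Str.startswith_eq, PySem.Str.toList_slice, PySem.Chars.slice_eq_listSlice,
            PySem.List.slice_from, hl, PySem.Chars.startswith]
        have hSM : PySem.Str.startswith t "SBM" = PySem.Str.startswith (PySem.Str.slice t (some 2) none) "M" := by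
          simp [PySem.Str.startswith_eq, PySem.Str.toList_slice, PySem.Chars.slice_eq_listSlice,
            PySem.List.slice_from, hl, PySem.Chars.startswith]
        have hSP : PySem.Str.startswith t "SBP" = PySem.Str.startswith (PySem.Str.slice t (some 2) none) "P" := by
          simp [PySem.Str.startswith_eq, PySem.Str.toList_slice, PySem.Chars.slice_eq_listSlice,
            PySem.List.slice_from, hl, PySem.Chars.startswith]
        simp only [ccvSuffixMapA, ccvOuterA, ccvInnerA, ccvPrefixScanA, ccvPrefixMapA, ccvAltPts,
          ccvMag, hO, hSB, hO1, hO2, hO3, hO4, hSVS, hSS, hSM, hSP, if_true, if_false,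
          Bool.false_eq_true, ite_false, ite_true]
        split_ifs <;> simp [ccvSum, ccvAppend] <;> ring
      case neg =>
        have hO : PySem.Str.startswith t "O" = false := by
          refine Bool.eq_false_iff.mpr fun hx => hc ?_
          have h : "O".toList <+: t.toList := (PySem.Chars.startswith_iff _ _).mp
            (by simpa [PySem.Str.startswith_eq] using hx)
          rw [hl, show "O".toList = ['O'] by decide] at h
          exact ((List.cons_prefix_cons.mp h).1).symm
        have hSB : PySem.Str.startswith t "SB" = false := by
          refine Bool.eq_false_iff.mpr fun hx => hSB2 ?_
          have h : "SB".toList <+: t.toList := (PySem.Chars.startswith_iff _ _).mp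
            (by simpa [PySem.Str.startswith_eq] using hx)
          rw [hl, show "SB".toList = ['S', 'B'] by decide] at h
          obtain ⟨h1, h2⟩ := List.cons_prefix_cons.mp h
          exact ⟨h1.symm, (PySem.Chars.startswith_iff rest ['B']).mpr h2⟩
        have h1 := ccv_sw_mono t "O" "OVS" (by decide) hO
        have h2 := ccv_sw_mono t "O" "OS" (by decide) hO
        have h3 := ccv_sw_mono t "O" "OM" (by decide) hO
        have h4 := ccv_sw_mono t "O" "OP" (by decide) hO
        have h5 := ccv_sw_mono t "SB" "SBVS" (by decide) hSB
        have h6 := ccv_sw_mono t "SB" "SBS" (by decide) hSB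
        have h7 := ccv_sw_mono t "SB" "SBM" (by decide) hSB
        have h8 := ccv_sw_mono t "SB" "SBP" (by decide) hSB
        simp only [ccvSuffixMapA, ccvOuterA, ccvInnerA, ccvPrefixScanA, ccvPrefixMapA, ccvAltPts,
          ccvMag, hO, hSB, h1, h2, h3, h4, h5, h6, h7, h8, Bool.false_eq_true, if_false, ite_false]
        split_ifs <;> simp [ccvSum]

theorem ccv_fold_A (ts : List String) (st : CcvSt) :
    ccvSum (ts.foldl (fun st term => ccvOuterA st term ccvSuffixMapA) st)
      = ccvSum st + (ts.map ccvAltPts).sum := by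
  induction ts generalizing st with
  | nil => simp
  | cons t rest ih => simp [List.foldl, ih, ccv_step]; ring

theorem ccv_fold_B (ts : List String) (c : Int) :
    ts.foldl (fun total term =>
      if PySem.Str.startswith term "O" then
        total + 1 * ccvMag term (PySem.Str.slice term (some 1) none)
      else if PySem.Str.startswith term "SB" then
        total + (-1) * ccvMag term (PySem.Str.slice term (some 2) none)
      else total) c = c + (ts.map ccvAltPts).sum := by
  induction ts generalizing c with
  | nil => simp
  | cons t rest ih =>
    simp only [List.foldl, List.map, List.sum_cons, ih, ccvAltPts]
    split_ifs <;> ring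

-- ===== VERDICT (by name: the statement is the Claim_ definition above) =====
theorem get_ccv_points_spec : Claim_equal_get_ccv_points := by
  intro ccv_terms _
  unfold Spec_get_ccv_points get_ccv_points get_ccv_points_alt
  rw [ccv_fold_B]
  have h := ccv_fold_A ccv_terms ⟨[], [], [], [], [], [], [], []⟩
  simp [ccvSum] at h ⊢
  exact h
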